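-- pv_equiv track=rewrite | github.com/MUsommer/advent_of_code | day8.py | part_1
-- ===== SOURCE A (Python) =====
-- def part_1(data, digits, digit_lens):
--     digit_dict = dict(zip(digit_lens, digits))
--     digit_count = dict(zip(digits, [0] * len(digits)))
--
--     for i in range(0, len(data), 2):
--         lens_to_find = [len(x) for x in data[i + 1] if len(x) in digit_lens]
--         for j in lens_to_find:
--             digit_count[digit_dict[j]] += 1
--
--     return digit_count
-- ===== SOURCE B (Python) =====
-- def part_1(data, digits, digit_lens):
--     digit_dict = dict(zip(digit_lens, digits))
--     # flatten every odd-index entry into one list of segment lengths (unfiltered)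
--     lengths = [len(x) for i in range(0, len(data), 2) for x in data[i + 1]]
--     # per-digit pass: each known length's total is counted directly from the flat list
--     digit_count = {d: 0 for d in digits}
--     for length, digit in digit_dict.items():
--         digit_count[digit] += lengths.count(length)
--     return digit_count
-- ===== Notes on version B (the rewrite author's own statement) =====
-- stated objective: alternative
-- what changed: B inverts the loop structure: it flattens all odd-index entries into one unfiltered list of segment lengths, then makes a per-digit pass over digit_dict.items() counting each known length directly with list.count, instead of A's single pass over the data that filters by list membership and increments digit_count per occurrence.
import Mathlib
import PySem

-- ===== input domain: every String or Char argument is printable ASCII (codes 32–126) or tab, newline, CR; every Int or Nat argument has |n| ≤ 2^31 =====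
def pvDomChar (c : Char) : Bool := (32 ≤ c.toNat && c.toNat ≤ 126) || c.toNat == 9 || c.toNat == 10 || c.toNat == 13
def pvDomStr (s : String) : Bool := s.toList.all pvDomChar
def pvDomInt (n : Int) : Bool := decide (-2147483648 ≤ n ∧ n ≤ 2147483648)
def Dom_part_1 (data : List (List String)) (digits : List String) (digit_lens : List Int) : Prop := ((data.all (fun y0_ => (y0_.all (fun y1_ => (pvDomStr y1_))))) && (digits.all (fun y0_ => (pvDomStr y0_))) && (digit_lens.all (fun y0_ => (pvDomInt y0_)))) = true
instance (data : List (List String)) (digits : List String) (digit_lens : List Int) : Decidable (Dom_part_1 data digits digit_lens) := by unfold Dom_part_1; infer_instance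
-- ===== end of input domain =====

-- B inverts the loop structure (alternative decomposition): it flattens all odd-index entries into
-- one unfiltered list of segment lengths, then a per-digit pass over digit_dict counts each known
-- length directly with list.count, instead of A's per-occurrence filtered increments.

-- ===== PORT A =====
def part_1 (data : List (List String)) (digits : List String) (digit_lens : List Int) : List (String × Int) :=
  let digit_dict : PySem.Dict Int String := PySem.Dict.ofList (digit_lens.zip digits)
  let digit_count : PySem.Dict String Int :=
    PySem.Dict.ofList (digits.zip (List.replicate digits.length (0 : Int)))
  let final :=
    (PySem.List.pyRange 0 (data.length : Int) 2).foldl (fun d i =>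
      let lens_to_find :=
        ((PySem.List.pyGetD data (i + 1) []).map (fun x => PySem.Str.len x)).filter
          (fun j => decide (j ∈ digit_lens))
      lens_to_find.foldl (fun d j => d.modify (digit_dict.getD j "") 0 (· + 1)) d) digit_count
  final.items

-- ===== PORT B =====
def part_1_alt (data : List (List String)) (digits : List String) (digit_lens : List Int) : List (String × Int) :=
  let digit_dict : PySem.Dict Int String := PySem.Dict.ofList (digit_lens.zip digits)
  let lengths : List Int :=
    (PySem.List.pyRange 0 (data.length : Int) 2).flatMap (fun i =>
      (PySem.List.pyGetD data (i + 1) []).map (fun x => PySem.Str.len x))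
  let digit_count : PySem.Dict String Int :=
    PySem.Dict.ofList (digits.map (fun d => (d, (0 : Int))))
  let final :=
    digit_dict.items.foldl (fun dc p =>
      dc.modify p.2 0 (· + (List.count p.1 lengths : Int))) digit_count
  final.items

-- ===== PRECONDITION & SPEC =====
-- Pre_ excludes exactly the inputs on which A raises: odd-length data (IndexError on data[i+1]),
-- and inputs where some string in an odd-indexed entry has a length that is in digit_lens but is
-- not a key of dict(zip(digit_lens, digits)) (KeyError).
def Pre_part_1 (data : List (List String)) (digits : List String) (digit_lens : List Int) : Prop :=
  data.length % 2 = 0 ∧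
  data.zipIdx.all (fun p => !decide (p.2 % 2 = 1) || p.1.all (fun x =>
    !decide (PySem.Str.len x ∈ digit_lens) ||
    decide (PySem.Str.len x ∈ (digit_lens.zip digits).map Prod.fst))) = true
instance (data : List (List String)) (digits : List String) (digit_lens : List Int) : Decidable (Pre_part_1 data digits digit_lens) := by unfold Pre_part_1; infer_instance

def pvWitness_part_1 : List (List String) × List String × List Int :=
  ([["ab"], ["ab", "abc"]], ["one", "seven"], [2, 3])

def Spec_part_1 (data : List (List String)) (digits : List String) (digit_lens : List Int) (out : List (String × Int)) : Prop := out = part_1_alt data digits digit_lens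
instance (data : List (List String)) (digits : List String) (digit_lens : List Int) (out : List (String × Int)) : Decidable (Spec_part_1 data digits digit_lens out) := by unfold Spec_part_1; infer_instance

-- ===== CLAIM (what is proved, stated in full; the proofs are below) =====
def Claim_equal_part_1 : Prop := ∀ (data : List (List String)) (digits : List String) (digit_lens : List Int), Dom_part_1 data digits digit_lens → Pre_part_1 data digits digit_lens → Spec_part_1 data digits digit_lens (part_1 data digits digit_lens)

-- ===== LEMMAS AND PROOFS =====

-- The flat, unfiltered list of segment lengths B builds.
def pvLens (data : List (List String)) : List Int :=
  (PySem.List.pyRange 0 (data.length : Int) 2).flatMap (fun i =>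
    (PySem.List.pyGetD data (i + 1) []).map (fun x => PySem.Str.len x))

-- The stream of matching segment lengths, row-flat (the multiset A counts).
def pvM (data : List (List String)) (dl : List Int) : List Int :=
  (PySem.List.pyRange 0 (data.length : Int) 2).flatMap (fun i =>
    ((PySem.List.pyGetD data (i + 1) []).map (fun x => PySem.Str.len x)).filter
      (fun j => decide (j ∈ dl)))

def pvKeyf (dl : List Int) (dg : List String) (j : Int) : String :=
  (PySem.Dict.ofList (dl.zip dg)).getD j ""

def pvD0 (dg : List String) : PySem.Dict String Int :=
  PySem.Dict.ofList (dg.map (fun d => (d, (0 : Int))))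

def pvFoldA (data : List (List String)) (dg : List String) (dl : List Int) : PySem.Dict String Int :=
  (pvM data dl).foldl (fun d j => d.modify (pvKeyf dl dg j) 0 (· + 1)) (pvD0 dg)

def pvFoldB (data : List (List String)) (dg : List String) (dl : List Int) : PySem.Dict String Int :=
  (PySem.Dict.ofList (dl.zip dg)).items.foldl
    (fun dc p => dc.modify p.2 0 (· + (List.count p.1 (pvLens data) : Int))) (pvD0 dg)

theorem pv_zip_replicate (dg : List String) :
    dg.zip (List.replicate dg.length (0 : Int)) = dg.map (fun d => (d, (0 : Int))) := by
  induction dg with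
  | nil => rfl
  | cons a t ih => simp [List.replicate_succ, ih]

theorem pv_foldl_nested {γ α β : Type} (l : List γ) (g : γ → List α) (f : β → α → β) (d0 : β) :
    l.foldl (fun d i => (g i).foldl f d) d0 = (l.flatMap g).foldl f d0 := by
  induction l generalizing d0 with
  | nil => rfl
  | cons a t ih => rw [List.foldl_cons, List.flatMap_cons, List.foldl_append, ih]

theorem pv_M_eq_filter_lens (data : List (List String)) (dl : List Int) :
    pvM data dl = (pvLens data).filter (fun j => decide (j ∈ dl)) := by
  unfold pvM pvLens
  induction (PySem.List.pyRange 0 (data.length : Int) 2) with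
  | nil => rfl
  | cons a t ih => rw [List.flatMap_cons, List.flatMap_cons, List.filter_append, ih]

theorem pv_keys_foldl_modify {α : Type} (l : List α) (keyf : α → String) (g : α → Int → Int)
    (d : PySem.Dict String Int) (h : ∀ a ∈ l, d.contains (keyf a) = true) :
    (l.foldl (fun d a => d.modify (keyf a) 0 (g a)) d).keys = d.keys := by
  induction l generalizing d with
  | nil => rfl
  | cons a t ih =>
    have hc := h a List.mem_cons_self
    have hk : (d.modify (keyf a) 0 (g a)).keys = d.keys := by
      rw [PySem.Dict.keys_modify]
      exact PySem.Dict.keys_insert_of_contains d _ hc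
    rw [List.foldl_cons, ih (d.modify (keyf a) 0 (g a))
      (fun b hb => by
        rw [PySem.Dict.contains_modify]
        simp [h b (List.mem_cons_of_mem a hb)]), hk]

theorem pv_getD_foldl_add {α : Type} (l : List α) (keyf : α → String) (g : α → Int)
    (d : PySem.Dict String Int) (c : String) :
    (l.foldl (fun d a => d.modify (keyf a) 0 (fun v => v + g a)) d).getD c 0
      = d.getD c 0 + ((l.filter (fun a => keyf a == c)).map g).sum := by
  induction l generalizing d with
  | nil => simp
  | cons a t ih =>
    rw [List.foldl_cons, ih, PySem.Dict.getD_modify, List.filter_cons]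
    by_cases h : c = keyf a
    · rw [if_pos h, if_pos (by simp [h]), List.map_cons, List.sum_cons, h]
      omega
    · rw [if_neg h, if_neg (by simp; exact fun hh => h hh.symm)]

theorem pv_items_foldl_insert_sub {κ ν : Type} [BEq κ] [LawfulBEq κ] (l : List (κ × ν))
    (d : PySem.Dict κ ν) (p : κ × ν)
    (h : p ∈ (l.foldl (fun acc q => acc.insert q.1 q.2) d).items) : p ∈ d.items ∨ p ∈ l := by
  induction l generalizing d with
  | nil => exact Or.inl h
  | cons a t ih =>
    rw [List.foldl_cons] at h
    rcases ih (d.insert a.1 a.2) h with h' | h'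
    · rcases (PySem.Dict.mem_items_insert d a.1 a.2 p).mp h' with h2 | h2
      · exact Or.inr (by simp [h2])
      · exact Or.inl h2.1
    · exact Or.inr (List.mem_cons_of_mem a h')

theorem pv_mem_items_ofList {κ ν : Type} [BEq κ] [LawfulBEq κ] (ps : List (κ × ν)) (p : κ × ν)
    (h : p ∈ (PySem.Dict.ofList ps).items) : p ∈ ps := by
  rcases pv_items_foldl_insert_sub ps PySem.Dict.empty p h with h0 | h0
  · exact absurd (show p ∈ ([] : List (κ × ν)) from h0) (List.not_mem_nil)
  · exact h0

theorem pv_keys_ofList {κ ν : Type} [BEq κ] [LawfulBEq κ] (ps : List (κ × ν)) :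
    (PySem.Dict.ofList ps).keys = PySem.Set.ofList (ps.map Prod.fst) := by
  have h := PySem.Dict.keys_foldl_insert_key ps Prod.fst (fun _ p => p.2) PySem.Dict.empty
  exact h.trans (PySem.Set.update_empty (ps.map Prod.fst))

theorem pv_keys_D0 (dg : List String) : (pvD0 dg).keys = PySem.Set.ofList dg := by
  unfold pvD0
  rw [pv_keys_ofList, List.map_map,
    show (Prod.fst ∘ fun d : String => (d, (0 : Int))) = id from rfl, List.map_id]

-- Under Pre_, every matching length j is a genuine entry (j, pvKeyf j) of digit_dict.
theorem pv_key_item (data : List (List String)) (dg : List String) (dl : List Int)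
    (hpre : Pre_part_1 data dg dl) :
    ∀ j ∈ pvM data dl, (j, pvKeyf dl dg j) ∈ (PySem.Dict.ofList (dl.zip dg)).items := by
  intro j hj
  unfold pvM at hj
  rw [List.mem_flatMap] at hj
  obtain ⟨i, hiR, hjf⟩ := hj
  rw [List.mem_filter] at hjf
  obtain ⟨hjm, hjdl⟩ := hjf
  rw [List.mem_map] at hjm
  obtain ⟨x, hx, hlen⟩ := hjm
  rw [PySem.List.mem_pyRange_iff_of_pos (by norm_num)] at hiR
  obtain ⟨h0i, hilt, hdvd⟩ := hiR
  rw [PySem.List.pyGetD_of_nonneg data [] (by omega)] at hx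
  have hmlt : (i + 1).toNat < data.length := by
    by_contra hge
    rw [List.getD_eq_getElem?_getD, List.getElem?_eq_none (by omega)] at hx
    simp at hx
  rw [List.getD_eq_getElem?_getD, List.getElem?_eq_getElem hmlt] at hx
  simp only [Option.getD_some] at hx
  have hzl : (i + 1).toNat < (data.zipIdx).length := by simpa [List.length_zipIdx] using hmlt
  have hzip : (data[(i + 1).toNat]'hmlt, (i + 1).toNat) ∈ data.zipIdx := by
    have h1 := List.getElem_zipIdx (l := data) (j := 0) hzl
    simp only [Nat.zero_add] at h1
    rw [← h1]
    exact List.getElem_mem hzl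
  have hodd : (i + 1).toNat % 2 = 1 := by omega
  have hjdl' : j ∈ dl := of_decide_eq_true hjdl
  have h2 := hpre.2
  rw [List.all_eq_true] at h2
  have h3 := h2 _ hzip
  simp only [Bool.or_eq_true, Bool.not_eq_true', decide_eq_false_iff_not, decide_eq_true_eq,
    List.all_eq_true] at h3
  rcases h3 with h3 | h3
  · exact absurd hodd h3
  have h4 := h3 x hx
  rcases h4 with h4 | h4
  · exact absurd (by rw [hlen]; exact hjdl') h4
  have hkey := h4
  rw [hlen] at hkey
  have hc1 : (PySem.Dict.ofList (dl.zip dg)).contains j = true := by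
    rw [PySem.Dict.contains_iff_mem_keys, pv_keys_ofList, PySem.Set.mem_ofList]
    exact hkey
  have hsome : ((PySem.Dict.ofList (dl.zip dg)).get? j).isSome = true := by
    rw [← PySem.Dict.contains_eq_isSome_get?]; exact hc1
  obtain ⟨v, hv⟩ := Option.isSome_iff_exists.mp hsome
  have hgetD : pvKeyf dl dg j = v := PySem.Dict.getD_of_get?_eq_some _ "" hv
  rw [hgetD]
  exact PySem.Dict.mem_items_of_get?_eq_some _ hv

theorem pv_contains (data : List (List String)) (dg : List String) (dl : List Int)
    (hpre : Pre_part_1 data dg dl) :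
    ∀ j ∈ pvM data dl, (pvD0 dg).contains (pvKeyf dl dg j) = true := by
  intro j hj
  have hit := pv_key_item data dg dl hpre j hj
  have hz := pv_mem_items_ofList _ _ hit
  have hvdg : pvKeyf dl dg j ∈ dg := (List.of_mem_zip hz).2
  rw [PySem.Dict.contains_iff_mem_keys, pv_keys_D0, PySem.Set.mem_ofList]
  exact hvdg

-- key-grouping: a countP over a stream whose every element is a key of an association list with
-- distinct keys equals the per-key sum of counts over the matching entries.
theorem pv_count_key_unique (L : List (Int × String)) (hnd : (L.map Prod.fst).Nodup)
    (m : Int) (v : String) (hm : (m, v) ∈ L) (c : String) :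
    L.countP (fun p => p.1 == m && p.2 == c) = if v == c then 1 else 0 := by
  induction L with
  | nil => exact absurd hm (List.not_mem_nil)
  | cons a t ih =>
    rw [List.map_cons, List.nodup_cons] at hnd
    rw [List.countP_cons]
    rcases List.mem_cons.mp hm with h | h
    · have hcount : t.countP (fun p => p.1 == m && p.2 == c) = 0 := by
        rw [List.countP_eq_zero]
        intro p hp
        have : p.1 ≠ m := by
          intro hpm
          have hmem : p.1 ∈ t.map Prod.fst := List.mem_map_of_mem hp
          rw [hpm] at hmem
          have ha1 : a.1 = m := by rw [← h]
          exact hnd.1 (ha1 ▸ hmem)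
        simp [this]
      rw [hcount, ← h]
      simp
    · have ham : a.1 ≠ m := by
        intro ha
        exact hnd.1 (by rw [ha]; exact List.mem_map_of_mem h)
      rw [ih hnd.2 h]
      simp [ham]

theorem pv_sum_group (L : List (Int × String)) (hnd : (L.map Prod.fst).Nodup)
    (M : List Int) (f : Int → String) (hM : ∀ j ∈ M, (j, f j) ∈ L) (c : String) :
    ((L.filter (fun p => p.2 == c)).map (fun p => (M.count p.1 : Int))).sum
      = (M.countP (fun j => f j == c) : Int) := by
  induction M with
  | nil => simp
  | cons m t ih =>
    have step : ∀ p : Int × String, ((m :: t).count p.1 : Int)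
        = (t.count p.1 : Int) + (if p.1 == m then (1 : Int) else 0) := by
      intro p
      rw [List.count_cons]
      split_ifs <;> simp_all
    rw [List.map_congr_left (fun p _ => step p), PySem.List.sum_map_add_int,
      ih (fun j hj => hM j (List.mem_cons_of_mem m hj)),
      PySem.List.sum_map_ite_one_zero, List.countP_filter,
      pv_count_key_unique L hnd m (f m) (hM m List.mem_cons_self) c,
      List.countP_cons]
    simp only [beq_iff_eq]
    split_ifs <;> push_cast <;> ring
  
theorem pv_A_eq (data : List (List String)) (dg : List String) (dl : List Int) :
    part_1 data dg dl = (pvFoldA data dg dl).items := by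
  unfold part_1 pvFoldA pvM pvKeyf pvD0
  rw [pv_zip_replicate]
  exact congrArg PySem.Dict.items
    (pv_foldl_nested (PySem.List.pyRange 0 (data.length : Int) 2)
      (fun i => ((PySem.List.pyGetD data (i + 1) []).map (fun x => PySem.Str.len x)).filter
        (fun j => decide (j ∈ dl)))
      (fun d j => d.modify ((PySem.Dict.ofList (dl.zip dg)).getD j "") 0 (· + 1))
      (PySem.Dict.ofList (dg.map (fun d => (d, (0 : Int))))))

theorem pv_B_eq (data : List (List String)) (dg : List String) (dl : List Int) :
    part_1_alt data dg dl = (pvFoldB data dg dl).items := rfl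

theorem pv_main (data : List (List String)) (dg : List String) (dl : List Int)
    (hpre : Pre_part_1 data dg dl) : part_1 data dg dl = part_1_alt data dg dl := by
  rw [pv_A_eq, pv_B_eq]
  have hcont := pv_contains data dg dl hpre
  have hcontB : ∀ p ∈ (PySem.Dict.ofList (dl.zip dg)).items,
      (pvD0 dg).contains p.2 = true := by
    intro p hp
    have hz := pv_mem_items_ofList _ _ hp
    rw [PySem.Dict.contains_iff_mem_keys, pv_keys_D0, PySem.Set.mem_ofList]
    exact (List.of_mem_zip hz).2
  have hnd : (pvD0 dg).keys.Nodup := PySem.Dict.nodup_keys_ofList _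
  have kA : (pvFoldA data dg dl).keys = (pvD0 dg).keys :=
    pv_keys_foldl_modify (pvM data dl) (pvKeyf dl dg) (fun _ => (· + 1)) (pvD0 dg) hcont
  have kB : (pvFoldB data dg dl).keys = (pvD0 dg).keys :=
    pv_keys_foldl_modify (PySem.Dict.ofList (dl.zip dg)).items Prod.snd
      (fun p => (· + (List.count p.1 (pvLens data) : Int))) (pvD0 dg) hcontB
  rw [PySem.Dict.items_eq_map_keys (pvFoldA data dg dl) (by rw [kA]; exact hnd) 0,
    PySem.Dict.items_eq_map_keys (pvFoldB data dg dl) (by rw [kB]; exact hnd) 0, kA, kB]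
  refine List.map_congr_left ?_
  intro c _
  have hA : (pvFoldA data dg dl).getD c 0
      = (pvD0 dg).getD c 0
        + (((pvM data dl).filter (fun j => pvKeyf dl dg j == c)).map (fun _ => (1 : Int))).sum :=
    pv_getD_foldl_add (pvM data dl) (pvKeyf dl dg) (fun _ => 1) (pvD0 dg) c
  have hB : (pvFoldB data dg dl).getD c 0
      = (pvD0 dg).getD c 0
        + ((((PySem.Dict.ofList (dl.zip dg)).items.filter (fun p => p.2 == c)).map
            (fun p => (List.count p.1 (pvLens data) : Int))).sum) :=
    pv_getD_foldl_add (PySem.Dict.ofList (dl.zip dg)).items Prod.snd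
      (fun p => (List.count p.1 (pvLens data) : Int)) (pvD0 dg) c
  -- counting a key's occurrences in the unfiltered length list equals counting in the stream
  have hcnt : ∀ p ∈ (PySem.Dict.ofList (dl.zip dg)).items.filter (fun p => p.2 == c),
      (List.count p.1 (pvLens data) : Int) = (List.count p.1 (pvM data dl) : Int) := by
    intro p hp
    have hz := pv_mem_items_ofList _ _ (List.mem_of_mem_filter hp)
    have hk : p.1 ∈ dl := (List.of_mem_zip hz).1
    rw [pv_M_eq_filter_lens, List.count_filter (by simpa using hk)]
  have hndL : ((PySem.Dict.ofList (dl.zip dg)).items.map Prod.fst).Nodup :=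
    PySem.Dict.nodup_keys_ofList _
  have hs1 : (((pvM data dl).filter (fun j => pvKeyf dl dg j == c)).map (fun _ => (1 : Int))).sum
      = ((pvM data dl).countP (fun j => pvKeyf dl dg j == c) : Int) := by
    rw [PySem.List.sum_map_const_int, List.countP_eq_length_filter]
    ring
  rw [hA, hB, hs1, List.map_congr_left hcnt,
    pv_sum_group _ hndL (pvM data dl) (pvKeyf dl dg) (pv_key_item data dg dl hpre) c]

-- ===== VERDICT (by name: the statement is the Claim_ definition above) =====
theorem part_1_spec : Claim_equal_part_1 := by
  intro data digits digit_lens _hdom hpre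
  exact pv_main data digits digit_lens hpre
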